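-- pv_equiv track=rewrite | github.com/kuzivaai/getregula | scripts/dependency_scan.py | _is_java_ai_artifact
-- ===== SOURCE A (Python) =====
-- _JAVA_AI_ARTIFACTS: set[str] = {
--     # LangChain4j
--     "dev.langchain4j:langchain4j",
--     "dev.langchain4j:langchain4j-open-ai",
--     "dev.langchain4j:langchain4j-anthropic",
--     "dev.langchain4j:langchain4j-ollama",
--     "dev.langchain4j:langchain4j-google-ai-gemini",
--     # Deep Java Library (DJL)
--     "ai.djl:api",
--     "ai.djl.pytorch:pytorch-engine",
--     "ai.djl.tensorflow:tensorflow-engine",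
--     "ai.djl.mxnet:mxnet-engine",
--     # DL4J / ND4J
--     "org.deeplearning4j:deeplearning4j-core",
--     "org.deeplearning4j:deeplearning4j-nn",
--     "org.nd4j:nd4j-native",
--     "org.nd4j:nd4j-cuda-11.6",
--     # TensorFlow Java
--     "org.tensorflow:tensorflow-core-platform",
--     "org.tensorflow:tensorflow-core-api",
--     # OpenAI / LLM provider SDKs
--     "com.theokanning.openai-gpt3-java:service",
--     "com.theokanning.openai-gpt3-java:api",
--     "io.github.stefanbratanov:jvm-openai",
--     "com.azure:azure-ai-openai",
--     "com.azure:azure-ai-inference",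
--     # Ollama
--     "io.github.ollama4j:ollama4j",
--     # Semantic Kernel
--     "com.microsoft.semantic-kernel:semantickernel-api",
--     "com.microsoft.semantic-kernel:semantickernel-core",
--     # Tokenizers
--     "com.knuddels:jtokkit",
--     # Weka (classical ML)
--     "nz.ac.waikato.cms.weka:weka-stable",
--     # Smile (ML framework)
--     "com.github.haifengl:smile-core",
--     "com.github.haifengl:smile-nlp",
-- }
--
-- def _is_java_ai_artifact(group_artifact: str) -> bool:
--     """Check whether a 'groupId:artifactId' string is a known AI library."""
--     norm = group_artifact.lower().strip()
--     # Exact match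
--     if norm in _JAVA_AI_ARTIFACTS:
--         return True
--     # Prefix match: catches sub-modules like dev.langchain4j:langchain4j-extra
--     for art in _JAVA_AI_ARTIFACTS:
--         if norm.startswith(art.split(":")[0] + ":"):
--             return True
--     return False
-- ===== SOURCE B (Python) =====
-- _JAVA_AI_ARTIFACTS: set[str] = {
--     "dev.langchain4j:langchain4j",
--     "dev.langchain4j:langchain4j-open-ai",
--     "dev.langchain4j:langchain4j-anthropic",
--     "dev.langchain4j:langchain4j-ollama",
--     "dev.langchain4j:langchain4j-google-ai-gemini",
--     "ai.djl:api",
--     "ai.djl.pytorch:pytorch-engine",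
--     "ai.djl.tensorflow:tensorflow-engine",
--     "ai.djl.mxnet:mxnet-engine",
--     "org.deeplearning4j:deeplearning4j-core",
--     "org.deeplearning4j:deeplearning4j-nn",
--     "org.nd4j:nd4j-native",
--     "org.nd4j:nd4j-cuda-11.6",
--     "org.tensorflow:tensorflow-core-platform",
--     "org.tensorflow:tensorflow-core-api",
--     "com.theokanning.openai-gpt3-java:service",
--     "com.theokanning.openai-gpt3-java:api",
--     "io.github.stefanbratanov:jvm-openai",
--     "com.azure:azure-ai-openai",
--     "com.azure:azure-ai-inference",
--     "io.github.ollama4j:ollama4j",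
--     "com.microsoft.semantic-kernel:semantickernel-api",
--     "com.microsoft.semantic-kernel:semantickernel-core",
--     "com.knuddels:jtokkit",
--     "nz.ac.waikato.cms.weka:weka-stable",
--     "com.github.haifengl:smile-core",
--     "com.github.haifengl:smile-nlp",
-- }
--
-- # Precomputed once: the set of known AI group ids.  Any exact-match artifact also
-- # starts with its own group prefix, so the group lookup alone decides membership.
-- _JAVA_AI_GROUPS: set[str] = {a.split(":")[0] for a in _JAVA_AI_ARTIFACTS}
--
--
-- def _is_java_ai_artifact(group_artifact: str) -> bool:
--     """Check whether a 'groupId:artifactId' string is a known AI library."""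
--     norm = group_artifact.lower().strip()
--     head, sep, _ = norm.partition(":")
--     return sep == ":" and head in _JAVA_AI_GROUPS
-- ===== Notes on version B (the rewrite author's own statement) =====
-- stated objective: simpler
-- what changed: Replaces A's exact-match membership test plus a prefix scan over all artifact coordinates with a single lookup of the group-id part before the first colon in a precomputed set of group ids (the exact-match branch is redundant since every artifact starts with its own group prefix).
import Mathlib
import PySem

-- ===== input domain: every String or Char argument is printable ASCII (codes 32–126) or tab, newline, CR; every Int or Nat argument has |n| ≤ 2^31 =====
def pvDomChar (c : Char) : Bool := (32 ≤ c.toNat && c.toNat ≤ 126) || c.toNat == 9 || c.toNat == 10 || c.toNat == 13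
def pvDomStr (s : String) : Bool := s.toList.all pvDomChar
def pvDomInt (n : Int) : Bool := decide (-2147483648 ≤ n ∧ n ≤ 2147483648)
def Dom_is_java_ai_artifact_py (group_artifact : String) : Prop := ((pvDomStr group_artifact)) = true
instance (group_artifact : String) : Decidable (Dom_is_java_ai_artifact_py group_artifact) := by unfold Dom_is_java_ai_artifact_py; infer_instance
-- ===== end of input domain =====

-- B replaces A's exact-match test plus prefix scan over all artifacts by a single lookup of the
-- group-id prefix in a precomputed set of group ids (objective: simpler).

-- ===== PORT A =====
-- _JAVA_AI_ARTIFACTS, in source order (a Python set literal of distinct strings)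
def pvArtifacts : List String := [
  "dev.langchain4j:langchain4j",
  "dev.langchain4j:langchain4j-open-ai",
  "dev.langchain4j:langchain4j-anthropic",
  "dev.langchain4j:langchain4j-ollama",
  "dev.langchain4j:langchain4j-google-ai-gemini",
  "ai.djl:api",
  "ai.djl.pytorch:pytorch-engine",
  "ai.djl.tensorflow:tensorflow-engine",
  "ai.djl.mxnet:mxnet-engine",
  "org.deeplearning4j:deeplearning4j-core",
  "org.deeplearning4j:deeplearning4j-nn",
  "org.nd4j:nd4j-native",
  "org.nd4j:nd4j-cuda-11.6",
  "org.tensorflow:tensorflow-core-platform",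
  "org.tensorflow:tensorflow-core-api",
  "com.theokanning.openai-gpt3-java:service",
  "com.theokanning.openai-gpt3-java:api",
  "io.github.stefanbratanov:jvm-openai",
  "com.azure:azure-ai-openai",
  "com.azure:azure-ai-inference",
  "io.github.ollama4j:ollama4j",
  "com.microsoft.semantic-kernel:semantickernel-api",
  "com.microsoft.semantic-kernel:semantickernel-core",
  "com.knuddels:jtokkit",
  "nz.ac.waikato.cms.weka:weka-stable",
  "com.github.haifengl:smile-core",
  "com.github.haifengl:smile-nlp"]

-- art.split(":")[0]; splitOn with a nonempty separator never returns [], so headD is exact here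
def pvGrp (art : List Char) : List Char := (PySem.Chars.splitOn art [':']).headD []

def is_java_ai_artifact_py (group_artifact : String) : Bool :=
  -- norm = group_artifact.lower().strip()
  let norm : List Char := PySem.Chars.strip (PySem.Chars.lower group_artifact.toList)
  -- if norm in _JAVA_AI_ARTIFACTS: return True
  if (pvArtifacts.map String.toList).contains norm then true
  else
    -- for art in _JAVA_AI_ARTIFACTS: if norm.startswith(art.split(":")[0] + ":"): return True
    (pvArtifacts.map String.toList).any (fun art =>
      PySem.Chars.startswith norm (pvGrp art ++ [':']))

-- ===== PORT B =====
-- _JAVA_AI_GROUPS = {a.split(":")[0] for a in _JAVA_AI_ARTIFACTS} (the distinct group ids)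
def pvGroups : List String := [
  "dev.langchain4j",
  "ai.djl",
  "ai.djl.pytorch",
  "ai.djl.tensorflow",
  "ai.djl.mxnet",
  "org.deeplearning4j",
  "org.nd4j",
  "org.tensorflow",
  "com.theokanning.openai-gpt3-java",
  "io.github.stefanbratanov",
  "com.azure",
  "io.github.ollama4j",
  "com.microsoft.semantic-kernel",
  "com.knuddels",
  "nz.ac.waikato.cms.weka",
  "com.github.haifengl"]

def is_java_ai_artifact_py_alt (group_artifact : String) : Bool :=
  let norm : List Char := PySem.Chars.strip (PySem.Chars.lower group_artifact.toList)
  -- head, sep, _ = norm.partition(":"), ported by hand: head is everything before the first ':',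
  -- and sep == ":" exactly when ':' occurs in norm (exact for a one-character separator)
  let head : List Char := norm.takeWhile (fun c => c != ':')
  norm.contains ':' && (pvGroups.map String.toList).contains head

-- ===== PRECONDITION & SPEC =====
def Spec_is_java_ai_artifact_py (group_artifact : String) (out : Bool) : Prop := out = is_java_ai_artifact_py_alt group_artifact
instance (group_artifact : String) (out : Bool) : Decidable (Spec_is_java_ai_artifact_py group_artifact out) := by unfold Spec_is_java_ai_artifact_py; infer_instance

-- ===== CLAIM (what is proved, stated in full; the proofs are below) =====
def Claim_equal_is_java_ai_artifact_py : Prop := ∀ (group_artifact : String), Dom_is_java_ai_artifact_py group_artifact → Spec_is_java_ai_artifact_py group_artifact (is_java_ai_artifact_py group_artifact)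

-- ===== LEMMAS AND PROOFS =====

-- if dropWhile p l has a head, that head fails p (no library lemma found for this)
theorem pv_dropWhile_head_false {α : Type} (p : α → Bool) (l : List α) (d : α) (ds : List α)
    (h : l.dropWhile p = d :: ds) : p d = false := by
  induction l with
  | nil => simp at h
  | cons a as ih =>
    by_cases hpa : p a = true
    · rw [List.dropWhile_cons_of_pos hpa] at h
      exact ih h
    · rw [List.dropWhile_cons_of_neg hpa] at h
      obtain ⟨rfl, -⟩ := List.cons.inj h
      simpa using hpa

-- A string starts with "g:" (g colon-free) iff it contains a ':' and g is exactly its part before the first ':'.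
theorem pv_startswith_group_colon (l g : List Char) (hg : ':' ∉ g) :
    PySem.Chars.startswith l (g ++ [':']) =
      (l.contains ':' && (l.takeWhile (fun c => c != ':') == g)) := by
  rw [Bool.eq_iff_iff]
  rw [PySem.Chars.startswith_iff]
  simp only [Bool.and_eq_true, beq_iff_eq, List.contains_iff_mem]
  constructor
  · rintro ⟨t, ht⟩
    rw [List.append_assoc] at ht
    constructor
    · rw [← ht]; simp
    · rw [← ht]
      rw [List.takeWhile_append]
      have hself : g.takeWhile (fun c => c != ':') = g := by
        rw [List.takeWhile_eq_self_iff]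
        intro x hx
        simp only [bne_iff_ne, ne_eq]
        rintro rfl
        exact hg hx
      simp [hself]
  · rintro ⟨hc, hh⟩
    have hsplit := List.takeWhile_append_dropWhile (p := fun c => c != ':') (l := l)
    have hcd : ':' ∈ l.dropWhile (fun c => c != ':') := by
      rcases (List.mem_append.mp (by rw [hsplit]; exact hc)) with h | h
      · exact absurd (List.mem_takeWhile_imp h) (by simp)
      · exact h
    obtain ⟨d, ds, hds⟩ : ∃ d ds, l.dropWhile (fun c => c != ':') = d :: ds := by
      cases hcase : l.dropWhile (fun c => c != ':') with
      | nil => rw [hcase] at hcd; simp at hcd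
      | cons d ds => exact ⟨d, ds, rfl⟩
    have hd : d = ':' := by
      have := pv_dropWhile_head_false (fun c => c != ':') l d ds hds
      simpa using this
    subst hd
    refine ⟨ds, ?_⟩
    rw [List.append_assoc, List.singleton_append, ← hh, ← hds, hsplit]

-- each artifact's group id is colon-free
theorem pv_groups_colon_free : ∀ art ∈ pvArtifacts.map String.toList, ':' ∉ pvGrp art := by decide

-- the group ids of the artifacts are exactly the elements of pvGroups
theorem pv_grp_mem_groups : ∀ art ∈ pvArtifacts.map String.toList,
    pvGrp art ∈ pvGroups.map String.toList := by decide

theorem pv_groups_from_artifacts : ∀ g ∈ pvGroups.map String.toList,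
    ∃ art ∈ pvArtifacts.map String.toList, pvGrp art = g := by decide

-- every artifact contains a ':' and its prefix before the first ':' is a known group id
theorem pv_exact_member : ∀ l ∈ pvArtifacts.map String.toList,
    l.contains ':' = true ∧
      (pvGroups.map String.toList).contains (l.takeWhile (fun c => c != ':')) = true := by decide

-- A's prefix scan equals B's group lookup, for every string
theorem pv_scan_eq_lookup (l : List Char) :
    (pvArtifacts.map String.toList).any (fun art =>
        PySem.Chars.startswith l (pvGrp art ++ [':'])) =
      (l.contains ':' && (pvGroups.map String.toList).contains
        (l.takeWhile (fun c => c != ':'))) := by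
  rw [Bool.eq_iff_iff]
  simp only [List.any_eq_true, Bool.and_eq_true]
  constructor
  · rintro ⟨art, hmem, hsw⟩
    rw [pv_startswith_group_colon l _ (pv_groups_colon_free art hmem)] at hsw
    simp only [Bool.and_eq_true, beq_iff_eq] at hsw
    obtain ⟨hc, hh⟩ := hsw
    refine ⟨hc, ?_⟩
    rw [List.contains_iff_mem, hh]
    exact pv_grp_mem_groups art hmem
  · rintro ⟨hc, hh⟩
    obtain ⟨art, hmem, hart⟩ :=
      pv_groups_from_artifacts _ (List.contains_iff_mem.mp hh)
    refine ⟨art, hmem, ?_⟩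
    rw [pv_startswith_group_colon l _ (pv_groups_colon_free art hmem), hc, hart]
    simp

-- ===== VERDICT (by name: the statement is the Claim_ definition above) =====
theorem is_java_ai_artifact_py_spec : Claim_equal_is_java_ai_artifact_py := by
  intro group_artifact _
  show is_java_ai_artifact_py group_artifact = is_java_ai_artifact_py_alt group_artifact
  unfold is_java_ai_artifact_py is_java_ai_artifact_py_alt
  set l := PySem.Chars.strip (PySem.Chars.lower group_artifact.toList) with hl
  by_cases h : (pvArtifacts.map String.toList).contains l = true
  · rcases pv_exact_member l (List.contains_iff_mem.mp h) with ⟨hc, hg⟩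
    rw [if_pos h]
    show true = (l.contains ':' && (pvGroups.map String.toList).contains
      (l.takeWhile (fun c => c != ':')))
    rw [hc, hg]; rfl
  · rw [if_neg h]
    exact pv_scan_eq_lookup l
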